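-- pv_equiv track=rewrite | github.com/Fluttershy0-0/2021-knu-cctui | Result/26.01/time_keyboard.py | check
-- ===== SOURCE A (Python) =====
-- def check(param):
--
--     i = 0
--     while i < len(param[0]):
--
--         if param[0][i].isupper() == True:
--             if i + 1 < len(param[0]):
--                 del param[0][i + 1]
--                 del param[1][i+1]
--                 del param[2][i]
--                 del param[3][i]
--
--
--         i += 1
--     return (param)
-- ===== SOURCE B (Python) =====
-- def check(param):
--     a = param[0]
--     if all(not s.isupper() for s in a):
--         return param
--     b, c, d = param[1], param[2], param[3]
--     r0, r1, r2, r3 = [], [], [], []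
--     j, n = 0, len(a)
--     while j < n:
--         x = a[j]
--         r0.append(x)
--         r1.append(b[j])
--         if x.isupper() and j + 1 < n:
--             r2.append(c[j + 1])
--             r3.append(d[j + 1])
--             j += 2
--         else:
--             r2.append(c[j])
--             r3.append(d[j])
--             j += 1
--     return [r0, r1, r2, r3] + param[4:]
-- ===== Notes on version B (the rewrite author's own statement) =====
-- stated objective: alternative
-- what changed: B replaces A's in-place scan with repeated list `del` (each an O(n) shift) by a no-uppercase fast path plus a single forward pass that copies the kept elements of the four lists, stepping by 2 past each uppercase trigger (measured ~1.26x at the largest size, below the 1.5x bar, so no speed is claimed).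
-- outside the precondition, e.g. on check([['a', 'B']]): A returns [['a', 'B']], B raises IndexError; on check([['A', 'b'], ['1', '2'], ['2'], ['3']]): A returns [['A'], ['1'], [], []], B raises IndexError
import Mathlib
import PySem

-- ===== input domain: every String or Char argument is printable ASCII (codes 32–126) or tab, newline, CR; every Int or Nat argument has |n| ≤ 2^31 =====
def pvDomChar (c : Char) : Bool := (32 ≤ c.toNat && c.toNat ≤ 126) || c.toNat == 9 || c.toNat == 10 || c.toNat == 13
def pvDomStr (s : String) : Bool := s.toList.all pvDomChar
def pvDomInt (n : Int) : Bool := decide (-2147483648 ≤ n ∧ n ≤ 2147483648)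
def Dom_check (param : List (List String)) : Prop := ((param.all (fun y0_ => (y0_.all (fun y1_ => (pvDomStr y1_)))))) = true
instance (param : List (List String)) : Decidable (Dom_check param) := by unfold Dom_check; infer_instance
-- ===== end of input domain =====

-- ===== PORT A =====
-- Header: B replaces A's repeated in-place `del` scan by one left-to-right pass that
-- copies the kept elements of the four lists (a different algorithm, same return value).
-- A mutates `param`'s inner lists in place and returns `param`; B builds fresh lists —
-- the equivalence proved here is about the RETURN value only.
-- Python str.isupper(), hand-ported (exact on the printable-ASCII domain Dom_check:
-- cased chars are exactly the ASCII letters there): at least one cased char and no lowercase one.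
def pyStrIsupperA (s : String) : Bool :=
  s.toList.any PySem.Chars.isalpha && s.toList.all (fun c => !PySem.Chars.islower c)

-- A's while-loop: i scans param[0]; on an uppercase element with a successor,
-- delete index i+1 from lists 0,1 and index i from lists 2,3; i += 1 each round.
def checkLoopA (l0 l1 l2 l3 : List String) (i : Nat) :
    List String × List String × List String × List String :=
  if h : i < l0.length then
    if pyStrIsupperA (l0.getD i "") then
      if hg : i + 1 < l0.length then
        checkLoopA (l0.eraseIdx (i + 1)) (l1.eraseIdx (i + 1))
                   (l2.eraseIdx i) (l3.eraseIdx i) (i + 1)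
      else
        checkLoopA l0 l1 l2 l3 (i + 1)
    else
      checkLoopA l0 l1 l2 l3 (i + 1)
  else
    (l0, l1, l2, l3)
  termination_by l0.length - i
  decreasing_by
  · simp only [List.length_eraseIdx, if_pos hg]; omega
  · omega
  · omega

def check (param : List (List String)) : List (List String) :=
  match param with
  | l0 :: l1 :: l2 :: l3 :: rest =>
      let (r0, r1, r2, r3) := checkLoopA l0 l1 l2 l3 0
      r0 :: r1 :: r2 :: r3 :: rest
  | _ => param

-- ===== PORT B =====
-- Python str.isupper(), B's own copy (exact on the printable-ASCII domain, as above).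
def pyStrIsupperB (s : String) : Bool :=
  s.toList.any PySem.Chars.isalpha && s.toList.all (fun c => !PySem.Chars.islower c)

-- B's while-loop: j walks forward once; an uppercase a[j] with a successor keeps
-- (a[j], b[j], c[j+1], d[j+1]) and jumps by 2, otherwise keep row j and step by 1.
def checkLoopB (a b c d : List String) (j : Nat) :
    List String × List String × List String × List String :=
  if _h : j < a.length then
    if pyStrIsupperB (a.getD j "") && decide (j + 1 < a.length) then
      let (r0, r1, r2, r3) := checkLoopB a b c d (j + 2)
      (a.getD j "" :: r0, b.getD j "" :: r1, c.getD (j + 1) "" :: r2, d.getD (j + 1) "" :: r3)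
    else
      let (r0, r1, r2, r3) := checkLoopB a b c d (j + 1)
      (a.getD j "" :: r0, b.getD j "" :: r1, c.getD j "" :: r2, d.getD j "" :: r3)
  else
    ([], [], [], [])
  termination_by a.length - j

-- Source B indexes param[0]..param[3] directly and returns [r0, r1, r2, r3] + param[4:]
-- (after a fast path: no uppercase element in param[0] means nothing to delete);
-- the getD defaults [] are never used inside Pre_check.
def check_alt (param : List (List String)) : List (List String) :=
  let a := param.getD 0 []
  if a.all (fun s => !pyStrIsupperB s) then
    param
  else
    let (r0, r1, r2, r3) :=
      checkLoopB a (param.getD 1 []) (param.getD 2 []) (param.getD 3 []) 0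
    [r0, r1, r2, r3] ++ param.drop 4

-- ===== PRECONDITION & SPEC =====
-- Same Bool as Python's all(not s.isupper() for s in l) on the ASCII domain (used by Pre_check).
def noUpper (l : List String) : Bool :=
  l.all (fun s => !(s.toList.any PySem.Chars.isalpha && s.toList.all (fun c => !PySem.Chars.islower c)))

-- Pre_check: param nonempty (A raises IndexError on []), and either param[0] has no
-- uppercase element (no deletion can fire) or param has at least four inner lists with
-- the first four of equal length — otherwise a triggered deletion in A can raise
-- IndexError, and where A happens to return on such ragged input (e.g. uppercase only
-- in the last position of param[0], or longer trailing lists) the natural B raises;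
-- see claim.json "cites" for such excluded inputs.
def Pre_check (param : List (List String)) : Prop :=
  param ≠ [] ∧
  (noUpper (param.getD 0 []) = true ∨
    (4 ≤ param.length ∧
     (param.getD 1 []).length = (param.getD 0 []).length ∧
     (param.getD 2 []).length = (param.getD 0 []).length ∧
     (param.getD 3 []).length = (param.getD 0 []).length))
instance (param : List (List String)) : Decidable (Pre_check param) := by
  unfold Pre_check; infer_instance
def pvWitness_check : List (List String) :=
  [["A", "x", "B", "y"], ["1", "2", "3", "4"], ["p", "q", "r", "s"], ["u", "v", "w", "z"]]

def Spec_check (param : List (List String)) (out : List (List String)) : Prop := out = check_alt param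
instance (param : List (List String)) (out : List (List String)) : Decidable (Spec_check param out) := by unfold Spec_check; infer_instance

-- ===== CLAIM (what is proved, stated in full; the proofs are below) =====
def Claim_equal_check : Prop := ∀ (param : List (List String)), Dom_check param → Pre_check param → Spec_check param (check param)

-- ===== LEMMAS AND PROOFS =====

theorem getD_mid (p : List String) (x : String) (s : List String) (k : Nat)
    (hk : k = p.length) : (p ++ x :: s).getD k "" = x := by
  subst hk; simp

theorem erase_cons2 (p : List String) (x x' : String) (s : List String) (k : Nat)
    (hk : k = p.length) : (p ++ x :: x' :: s).eraseIdx (k + 1) = p ++ x :: s := by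
  subst hk
  rw [List.eraseIdx_append_of_length_le (by omega)]
  simp

theorem erase_cons1 (p : List String) (z : String) (s : List String) (k : Nat)
    (hk : k = p.length) : (p ++ z :: s).eraseIdx k = p ++ s := by
  subst hk
  rw [List.eraseIdx_append_of_length_le (by omega)]
  simp

-- Common suffix function: what both loops compute on the not-yet-scanned suffixes
-- (used only under the equal-length hypothesis of Pre_check).
def goS : List String → List String → List String → List String →
    List String × List String × List String × List String
  | x :: x' :: t0, y :: y' :: t1, z :: z' :: t2, w :: w' :: t3 =>
      if pyStrIsupperB x then
        let r := goS t0 t1 t2 t3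
        (x :: r.1, y :: r.2.1, z' :: r.2.2.1, w' :: r.2.2.2)
      else
        let r := goS (x' :: t0) (y' :: t1) (z' :: t2) (w' :: t3)
        (x :: r.1, y :: r.2.1, z :: r.2.2.1, w :: r.2.2.2)
  | [x], [y], [z], [w] => ([x], [y], [z], [w])
  | _, _, _, _ => ([], [], [], [])

theorem isupperAB (s : String) : pyStrIsupperA s = pyStrIsupperB s := rfl

theorem checkA_eq_goS
    (s0 s1 s2 s3 p0 p1 p2 p3 : List String)
    (h1 : s1.length = s0.length) (h2 : s2.length = s0.length) (h3 : s3.length = s0.length)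
    (q1 : p1.length = p0.length) (q2 : p2.length = p0.length) (q3 : p3.length = p0.length) :
    checkLoopA (p0 ++ s0) (p1 ++ s1) (p2 ++ s2) (p3 ++ s3) p0.length =
      (p0 ++ (goS s0 s1 s2 s3).1, p1 ++ (goS s0 s1 s2 s3).2.1,
       p2 ++ (goS s0 s1 s2 s3).2.2.1, p3 ++ (goS s0 s1 s2 s3).2.2.2) := by
  induction s0, s1, s2, s3 using goS.induct generalizing p0 p1 p2 p3 with
  | case1 x x' t0 y y' t1 z z' t2 w w' t3 hup ih =>
      rw [checkLoopA]
      rw [dif_pos (by simp)]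
      rw [getD_mid _ _ _ _ rfl, isupperAB, if_pos hup]
      rw [dif_pos (by simp)]
      rw [erase_cons2 p0 x x' t0 _ rfl, erase_cons2 p1 y y' t1 _ q1.symm,
          erase_cons1 p2 z (z' :: t2) _ q2.symm, erase_cons1 p3 w (w' :: t3) _ q3.symm]
      have H := ih (p0 ++ [x]) (p1 ++ [y]) (p2 ++ [z']) (p3 ++ [w'])
        (by simp at h1 ⊢; omega) (by simp at h2 ⊢; omega) (by simp at h3 ⊢; omega)
        (by simp [q1]) (by simp [q2]) (by simp [q3])
      simp only [List.append_assoc, List.singleton_append, List.length_append,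
        List.length_cons, List.length_nil] at H ⊢
      rw [H]
      simp [goS, hup]
  | case2 x x' t0 y y' t1 z z' t2 w w' t3 hup ih =>
      rw [checkLoopA]
      rw [dif_pos (by simp)]
      rw [getD_mid _ _ _ _ rfl, isupperAB, if_neg hup]
      have H := ih (p0 ++ [x]) (p1 ++ [y]) (p2 ++ [z]) (p3 ++ [w])
        (by simp at h1 ⊢; omega) (by simp at h2 ⊢; omega) (by simp at h3 ⊢; omega)
        (by simp [q1]) (by simp [q2]) (by simp [q3])
      simp only [List.append_assoc, List.singleton_append, List.length_append,
        List.length_cons, List.length_nil] at H ⊢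
      rw [H]
      simp [goS, hup]
  | case3 x y z w =>
      rw [checkLoopA]
      rw [dif_pos (by simp)]
      rw [getD_mid _ _ _ _ rfl, isupperAB]
      have hterm : checkLoopA (p0 ++ [x]) (p1 ++ [y]) (p2 ++ [z]) (p3 ++ [w])
          (p0.length + 1) = (p0 ++ [x], p1 ++ [y], p2 ++ [z], p3 ++ [w]) := by
        rw [checkLoopA, dif_neg (by simp)]
      split_ifs with hu hg
      · exact absurd hg (by simp)
      · rw [hterm]; simp [goS]
      · rw [hterm]; simp [goS]
  | case4 s0 s1 s2 s3 hnm1 hnm2 =>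
      rcases s0 with _ | ⟨x, _ | ⟨x', t0⟩⟩ <;>
        rcases s1 with _ | ⟨y, _ | ⟨y', t1⟩⟩ <;>
        rcases s2 with _ | ⟨z, _ | ⟨z', t2⟩⟩ <;>
        rcases s3 with _ | ⟨w, _ | ⟨w', t3⟩⟩ <;>
        simp only [List.length_nil, List.length_cons] at h1 h2 h3 <;>
        first
          | omega
          | exact (hnm2 _ _ _ _ rfl rfl rfl rfl).elim
          | exact (hnm1 _ _ _ _ _ _ _ _ _ _ _ _ rfl rfl rfl rfl).elim
          | (rw [checkLoopA, dif_neg (by simp)]; simp [goS])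

theorem drop_cons_getD (l : List String) (j : Nat) (h : j < l.length) :
    l.drop j = l.getD j "" :: l.drop (j + 1) := by
  rw [List.drop_eq_getElem_cons h]
  simp [List.getD_eq_getElem?_getD, List.getElem?_eq_getElem h]

theorem checkB_eq_goS
    (a b c d : List String) (j : Nat)
    (h1 : b.length = a.length) (h2 : c.length = a.length) (h3 : d.length = a.length) :
    checkLoopB a b c d j = goS (a.drop j) (b.drop j) (c.drop j) (d.drop j) := by
  fun_induction checkLoopB a b c d j with
  | case1 j h hg r0 r1 r2 r3 heq ih =>
      have hj1 : j + 1 < a.length := by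
        rcases Bool.and_eq_true_iff.mp hg with ⟨_, hd⟩
        exact of_decide_eq_true hd
      have hu : pyStrIsupperB (a.getD j "") = true :=
        (Bool.and_eq_true_iff.mp hg).1
      have hr : (r0, r1, r2, r3) =
          goS (a.drop (j + 2)) (b.drop (j + 2)) (c.drop (j + 2)) (d.drop (j + 2)) :=
        heq ▸ ih
      rw [drop_cons_getD a j h, drop_cons_getD a (j + 1) hj1,
          drop_cons_getD b j (by omega), drop_cons_getD b (j + 1) (by omega),
          drop_cons_getD c j (by omega), drop_cons_getD c (j + 1) (by omega),
          drop_cons_getD d j (by omega), drop_cons_getD d (j + 1) (by omega)]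
      simp only [goS, hu, if_true, ← hr]
  | case2 j h hg r0 r1 r2 r3 heq ih =>
      have hr : (r0, r1, r2, r3) =
          goS (a.drop (j + 1)) (b.drop (j + 1)) (c.drop (j + 1)) (d.drop (j + 1)) :=
        heq ▸ ih
      by_cases hj1 : j + 1 < a.length
      · have hu : pyStrIsupperB (a.getD j "") = false := by
          cases hb : pyStrIsupperB (a.getD j "") with
          | false => rfl
          | true => exact absurd (by rw [hb, decide_eq_true hj1]; simp) hg
        rw [drop_cons_getD a j h, drop_cons_getD b j (by omega),
            drop_cons_getD c j (by omega), drop_cons_getD d j (by omega),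
            drop_cons_getD a (j + 1) hj1, drop_cons_getD b (j + 1) (by omega),
            drop_cons_getD c (j + 1) (by omega), drop_cons_getD d (j + 1) (by omega)]
        simp only [goS, hu, Bool.false_eq_true, if_false]
        rw [← drop_cons_getD a (j + 1) hj1, ← drop_cons_getD b (j + 1) (by omega),
            ← drop_cons_getD c (j + 1) (by omega), ← drop_cons_getD d (j + 1) (by omega),
            ← hr]
      · have ea : a.drop (j + 1) = [] := List.drop_eq_nil_of_le (by omega)
        have eb : b.drop (j + 1) = [] := List.drop_eq_nil_of_le (by omega)
        have ec : c.drop (j + 1) = [] := List.drop_eq_nil_of_le (by omega)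
        have ed : d.drop (j + 1) = [] := List.drop_eq_nil_of_le (by omega)
        rw [ea, eb, ec, ed] at hr
        simp only [goS, Prod.mk.injEq] at hr
        obtain ⟨u0, u1, u2, u3⟩ := hr
        rw [drop_cons_getD a j h, drop_cons_getD b j (by omega),
            drop_cons_getD c j (by omega), drop_cons_getD d j (by omega),
            ea, eb, ec, ed]
        simp [goS, u0, u1, u2, u3]
  | case3 j h =>
      have ea : a.drop j = [] := List.drop_eq_nil_of_le (by omega)
      have eb : b.drop j = [] := List.drop_eq_nil_of_le (by omega)
      have ec : c.drop j = [] := List.drop_eq_nil_of_le (by omega)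
      have ed : d.drop j = [] := List.drop_eq_nil_of_le (by omega)
      rw [ea, eb, ec, ed]
      simp [goS]

theorem checkLoopA_noUpper (l0 l1 l2 l3 : List String) (i : Nat)
    (h : ∀ s ∈ l0, pyStrIsupperA s = false) :
    checkLoopA l0 l1 l2 l3 i = (l0, l1, l2, l3) := by
  fun_induction checkLoopA l0 l1 l2 l3 i with
  | case1 l0 l1 l2 l3 i hi hup hg ih =>
      have hmem : l0.getD i "" ∈ l0 := by
        rw [List.getD_eq_getElem?_getD, List.getElem?_eq_getElem hi]
        exact List.getElem_mem hi
      rw [h _ hmem] at hup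
      exact absurd hup (by simp)
  | case2 l0 l1 l2 l3 i hi hup hg ih => exact ih h
  | case3 l0 l1 l2 l3 i hi hup ih => exact ih h
  | case4 l0 l1 l2 l3 i hi => rfl

-- ===== VERDICT (by name: the statement is the Claim_ definition above) =====
theorem check_spec : Claim_equal_check := by
  intro param _ hpre
  obtain ⟨hne, hdisj⟩ := hpre
  show _ = check_alt param
  by_cases hg : ((param.getD 0 []).all (fun s => !pyStrIsupperB s)) = true
  · have hB : check_alt param = param := by
      simp only [check_alt]
      rw [if_pos hg]
    rw [hB]
    have hAll : ∀ s ∈ param.getD 0 [], pyStrIsupperA s = false := by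
      intro s hs
      have := List.all_eq_true.mp hg s hs
      simpa [isupperAB] using this
    rcases param with _ | ⟨l0, _ | ⟨l1, _ | ⟨l2, _ | ⟨l3, rest⟩⟩⟩⟩
    · exact absurd rfl hne
    · rfl
    · rfl
    · rfl
    · simp only [check]
      rw [checkLoopA_noUpper l0 l1 l2 l3 0
        (by simpa [List.getD_cons_zero] using hAll)]
  · have h4 := hdisj.resolve_left (by
      intro hnu
      exact hg (by simpa [noUpper, pyStrIsupperB] using hnu))
    obtain ⟨hlen, e1, e2, e3⟩ := h4
    match param, hlen with
    | l0 :: l1 :: l2 :: l3 :: rest, _ =>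
      simp only [List.getD_cons_succ, List.getD_cons_zero] at e1 e2 e3 hg
      have hA := checkA_eq_goS l0 l1 l2 l3 [] [] [] [] e1 e2 e3 rfl rfl rfl
      have hB := checkB_eq_goS l0 l1 l2 l3 0 e1 e2 e3
      simp only [List.nil_append, List.length_nil] at hA
      simp only [List.drop_zero] at hB
      simp only [check, check_alt, List.getD_cons_succ, List.getD_cons_zero]
      rw [if_neg hg]
      simp only [hA, hB, List.drop_succ_cons, List.drop_zero]
      rfl
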